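-- pv_equiv track=rewrite | github.com/bdambrosio/Owl | tests/owl/semanticScholar3.py | check_entities_against_draft
-- ===== SOURCE A (Python) =====
-- def check_entities_against_draft(entities, draft):
--     entities_in_text = []
--     entities_not_in_text = []
--     long_text=draft.lower()
--     for entity in entities:
--         if entity.lower() in long_text:
--             entities_in_text.append(entity)
--         else:
--             entities_not_in_text.append(entity)
--     return entities_in_text, entities_not_in_text
-- ===== SOURCE B (Python) =====
-- def check_entities_against_draft(entities, draft):
--     long_text = draft.lower()
--     needles = [e.lower() for e in entities]
--     lengths = set(len(n) for n in needles)
--     windows = set()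
--     for L in lengths:
--         for i in range(len(long_text) - L + 1):
--             windows.add(long_text[i:i + L])
--     entities_in_text = []
--     entities_not_in_text = []
--     for entity, needle in zip(entities, needles):
--         if needle in windows:
--             entities_in_text.append(entity)
--         else:
--             entities_not_in_text.append(entity)
--     return entities_in_text, entities_not_in_text
-- ===== Notes on version B (the rewrite author's own statement) =====
-- stated objective: faster
-- what changed: Instead of running a substring search over the draft for every entity, B indexes the lowered draft once per distinct entity length (a hash set of all draft windows of those lengths) and classifies each entity by a single set lookup of its lowered form.
import Mathlib
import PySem

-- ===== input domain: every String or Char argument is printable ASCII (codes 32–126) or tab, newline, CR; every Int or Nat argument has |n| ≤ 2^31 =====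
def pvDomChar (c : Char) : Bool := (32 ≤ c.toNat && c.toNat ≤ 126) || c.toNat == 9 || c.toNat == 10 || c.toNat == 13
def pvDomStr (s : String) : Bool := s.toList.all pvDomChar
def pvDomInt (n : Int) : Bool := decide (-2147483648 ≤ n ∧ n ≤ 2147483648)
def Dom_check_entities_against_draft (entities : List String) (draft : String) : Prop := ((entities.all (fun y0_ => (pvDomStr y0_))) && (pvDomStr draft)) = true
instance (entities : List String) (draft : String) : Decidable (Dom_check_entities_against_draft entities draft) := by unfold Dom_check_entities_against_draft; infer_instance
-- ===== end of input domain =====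

-- B indexes the lowered draft once (a set of all draft windows of each needed entity length), then classifies each
-- entity by one set lookup instead of a per-entity substring scan; objective: alternative algorithm, same results.


-- ===== PORT A =====
-- Port of A: lower the draft, one pass over the entities, substring test per entity, two append-accumulators.
def check_entities_against_draft (entities : List String) (draft : String) : List String × List String :=
  let long_text := PySem.Str.lower draft
  entities.foldl
    (fun acc entity =>
      if PySem.Str.isIn (PySem.Str.lower entity) long_text then
        (acc.1 ++ [entity], acc.2)
      else
        (acc.1, acc.2 ++ [entity]))
    ([], [])

-- ===== PORT B =====
-- Port of B: build the set `windows` of all draft windows of each needed length, then classify by set lookup.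
def check_entities_against_draft_alt (entities : List String) (draft : String) : List String × List String :=
  let long_text := PySem.Str.lower draft
  let needles := entities.map (fun e => PySem.Str.lower e)
  let lengths : PySem.Set Int := PySem.Set.ofList (needles.map (fun n => (PySem.Str.len n : Int)))
  let windows : PySem.Set String :=
    lengths.foldl
      (fun w L =>
        (PySem.List.pyRange 0 ((PySem.Str.len long_text : Int) - L + 1) 1).foldl
          (fun w i => PySem.Set.add w (PySem.Str.slice long_text (some i) (some (i + L)))) w)
      PySem.Set.empty
  (entities.zip needles).foldl
    (fun acc p =>
      if PySem.Set.contains windows p.2 then (acc.1 ++ [p.1], acc.2)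
      else (acc.1, acc.2 ++ [p.1]))
    ([], [])

-- ===== PRECONDITION & SPEC =====
def Spec_check_entities_against_draft (entities : List String) (draft : String) (out : List String × List String) : Prop := out = check_entities_against_draft_alt entities draft
instance (entities : List String) (draft : String) (out : List String × List String) : Decidable (Spec_check_entities_against_draft entities draft out) := by unfold Spec_check_entities_against_draft; infer_instance

-- ===== CLAIM (what is proved, stated in full; the proofs are below) =====
def Claim_equal_check_entities_against_draft : Prop := ∀ (entities : List String) (draft : String), Dom_check_entities_against_draft entities draft → Spec_check_entities_against_draft entities draft (check_entities_against_draft entities draft)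

-- ===== LEMMAS AND PROOFS =====

-- A's loop: partition by p, as two filters.
theorem ceadFoldA_eq (p : String → Bool) (l : List String) (ins outs : List String) :
    l.foldl (fun acc entity => if p entity then (acc.1 ++ [entity], acc.2) else (acc.1, acc.2 ++ [entity])) (ins, outs)
      = (ins ++ l.filter p, outs ++ l.filter (fun e => !p e)) := by
  induction l generalizing ins outs with
  | nil => simp
  | cons h t ih => by_cases hp : p h <;> simp [List.foldl_cons, hp, ih]

-- B's loop over (entity, needle) pairs: partition of the entities by q ∘ f.
theorem ceadFoldB_eq (f : String → String) (q : String → Bool) (l : List String) (ins outs : List String) :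
    (l.zip (l.map f)).foldl (fun acc p => if q p.2 then (acc.1 ++ [p.1], acc.2) else (acc.1, acc.2 ++ [p.1])) (ins, outs)
      = (ins ++ l.filter (fun e => q (f e)), outs ++ l.filter (fun e => !q (f e))) := by
  induction l generalizing ins outs with
  | nil => simp
  | cons h t ih => by_cases hq : q (f h) <;> simp [List.foldl_cons, hq, ih]

-- membership in the nested window-building fold
theorem ceadMemWindows {α β γ : Type} [BEq γ] [LawfulBEq γ]
    (ls : List α) (g : α → List β) (f : α → β → γ) (s : PySem.Set γ) (y : γ) :
    y ∈ ls.foldl (fun w L => (g L).foldl (fun w i => PySem.Set.add w (f L i)) w) s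
      ↔ y ∈ s ∨ ∃ L ∈ ls, ∃ i ∈ g L, y = f L i := by
  induction ls generalizing s with
  | nil => simp
  | cons h t ih =>
    simp only [List.foldl_cons, ih, PySem.Set.mem_foldl_add, List.mem_cons]
    constructor
    · rintro ((hs | ⟨b, hb, rfl⟩) | ⟨L, hL, i, hi, rfl⟩)
      · exact Or.inl hs
      · exact Or.inr ⟨h, Or.inl rfl, b, hb, rfl⟩
      · exact Or.inr ⟨L, Or.inr hL, i, hi, rfl⟩
    · rintro (hs | ⟨L, (rfl | hL), i, hi, rfl⟩)
      · exact Or.inl (Or.inl hs)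
      · exact Or.inl (Or.inr ⟨i, hi, rfl⟩)
      · exact Or.inr ⟨L, hL, i, hi, rfl⟩

-- the window characterisation: a string of length L occurs as a window of length L iff it is a substring
theorem ceadWindow_iff (text nd : String) :
    (∃ i : Int, i ∈ PySem.List.pyRange 0 ((PySem.Str.len text : Int) - (PySem.Str.len nd : Int) + 1) 1 ∧
        nd = PySem.Str.slice text (some i) (some (i + (PySem.Str.len nd : Int))))
      ↔ PySem.Str.isIn nd text = true := by
  rw [PySem.Str.isIn_eq, ← PySem.Chars.exists_prefix_drop_iff_isIn]
  simp only [PySem.Str.len]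
  constructor
  · rintro ⟨i, hmem, hnd⟩
    rw [PySem.List.mem_pyRange_iff_of_pos (by norm_num)] at hmem
    obtain ⟨h0, hlt, -⟩ := hmem
    obtain ⟨j, rfl⟩ := Int.eq_ofNat_of_zero_le h0
    refine ⟨j, ?_⟩
    conv_lhs => rw [hnd]
    rw [PySem.Str.toList_slice, PySem.Chars.slice_eq_listSlice, PySem.List.slice_natCast_add]
    exact List.take_prefix _ _
  · rintro ⟨j, hpref⟩
    have hsub : nd.toList = List.take nd.toList.length (List.drop j text.toList) :=
      List.prefix_iff_eq_take.mp hpref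
    by_cases hL : nd.toList.length = 0
    · refine ⟨0, ?_, ?_⟩
      · rw [PySem.List.mem_pyRange_iff_of_pos (by norm_num)]
        exact ⟨le_refl _, by omega, ⟨0, by ring⟩⟩
      · apply String.toList_inj.mp
        rw [PySem.Str.toList_slice, PySem.Chars.slice_eq_listSlice]
        have h00 : ((0:Int) + ((nd.toList.length:Nat):Int)) = ((0:Nat):Int) + ((0:Nat):Int) := by omega
        rw [h00]
        have hz : (0:Int) = ((0:Nat):Int) := rfl
        rw [hz, PySem.List.slice_natCast_add]
        simp [List.length_eq_zero_iff.mp hL]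
    · have hjn : j + nd.toList.length ≤ text.toList.length := by
        have h1 := hpref.length_le
        have h2 : (List.drop j text.toList).length = text.toList.length - j := by simp
        by_cases hj : j ≤ text.toList.length
        · omega
        · exfalso
          have : List.drop j text.toList = [] := List.drop_eq_nil_of_le (by omega)
          rw [this] at hsub
          simp at hsub
          omega
      refine ⟨(j:Int), ?_, ?_⟩
      · rw [PySem.List.mem_pyRange_iff_of_pos (by norm_num)]
        exact ⟨by positivity, by omega, ⟨j, by ring⟩⟩
      · apply String.toList_inj.mp
        rw [PySem.Str.toList_slice, PySem.Chars.slice_eq_listSlice,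
          PySem.List.slice_natCast_add]
        exact hsub

-- the set lookup in B's window index equals A's substring test, for any needle whose length was indexed
theorem ceadLookup_eq (text : String) (lens : List Int) (nd : String)
    (hL : (PySem.Str.len nd : Int) ∈ lens) (hnn : ∀ L ∈ lens, 0 ≤ L) :
    PySem.Set.contains
      (lens.foldl
        (fun w L =>
          (PySem.List.pyRange 0 ((PySem.Str.len text : Int) - L + 1) 1).foldl
            (fun w i => PySem.Set.add w (PySem.Str.slice text (some i) (some (i + L)))) w)
        PySem.Set.empty) nd
      = PySem.Str.isIn nd text := by
  rw [Bool.eq_iff_iff, PySem.Set.contains_iff, ceadMemWindows]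
  constructor
  · rintro (hmem | ⟨L, hLl, i, hi, rfl⟩)
    · simp [PySem.Set.empty] at hmem
    · obtain ⟨k, rfl⟩ := Int.eq_ofNat_of_zero_le (hnn L hLl)
      rw [PySem.List.mem_pyRange_iff_of_pos (by norm_num)] at hi
      obtain ⟨h0, hlt, -⟩ := hi
      obtain ⟨j, rfl⟩ := Int.eq_ofNat_of_zero_le h0
      rw [PySem.Str.isIn_eq, ← PySem.Chars.exists_prefix_drop_iff_isIn]
      refine ⟨j, ?_⟩
      rw [PySem.Str.toList_slice, PySem.Chars.slice_eq_listSlice, PySem.List.slice_natCast_add]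
      exact List.take_prefix _ _
  · intro h
    obtain ⟨i, hmem, hnd⟩ := (ceadWindow_iff text nd).mpr h
    exact Or.inr ⟨_, hL, i, hmem, hnd⟩

-- ===== VERDICT (by name: the statement is the Claim_ definition above) =====
theorem check_entities_against_draft_spec : Claim_equal_check_entities_against_draft := by
  intro entities draft _
  unfold Spec_check_entities_against_draft check_entities_against_draft check_entities_against_draft_alt
  rw [ceadFoldA_eq, ceadFoldB_eq]
  have hpt : ∀ e ∈ entities,
      PySem.Set.contains
        ((PySem.Set.ofList ((entities.map (fun e => PySem.Str.lower e)).map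
            (fun n => (PySem.Str.len n : Int)))).foldl
          (fun w L =>
            (PySem.List.pyRange 0 ((PySem.Str.len (PySem.Str.lower draft) : Int) - L + 1) 1).foldl
              (fun w i => PySem.Set.add w
                (PySem.Str.slice (PySem.Str.lower draft) (some i) (some (i + L)))) w)
          PySem.Set.empty) (PySem.Str.lower e)
        = PySem.Str.isIn (PySem.Str.lower e) (PySem.Str.lower draft) := by
    intro e he
    apply ceadLookup_eq
    · rw [PySem.Set.mem_ofList]
      exact List.mem_map.mpr ⟨PySem.Str.lower e, List.mem_map.mpr ⟨e, he, rfl⟩, rfl⟩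
    · intro L hLl
      rw [PySem.Set.mem_ofList] at hLl
      obtain ⟨n, -, rfl⟩ := List.mem_map.mp hLl
      simp [PySem.Str.len]
  simp only [List.nil_append]
  refine Prod.ext ?_ ?_
  · exact List.filter_congr (fun e he => (hpt e he).symm)
  · exact List.filter_congr (fun e he => by rw [hpt e he])
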